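-- pv_equiv track=rewrite | github.com/dev-jungbin/AlgorithmsForEveryone-with-Python | chapter-4.py | c4_2
-- ===== SOURCE A (Python) =====
-- def c4_2(numList, count):
--     if count <= 1:
--         return numList[0]
--     else:
--         if numList[count - 1] > c4_2(numList, count - 2):
--             return numList[count - 1]
--         else:
--             return c4_2(numList, count - 2)
-- ===== SOURCE B (Python) =====
-- def c4_2(numList, count):
--     best = numList[0]
--     i = count - 1
--     while i >= 1:
--         if numList[i] > best:
--             best = numList[i]
--         i -= 2
--     return best
-- ===== Notes on version B (the rewrite author's own statement) =====
-- stated objective: faster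
-- what changed: Replaced the binary-branching recursion (which recomputes c4_2(numList, count-2) and can make O(2^(count/2)) calls) with a single iterative loop stepping the index down by 2 while tracking the running maximum; intended as asymptotically faster — a timing run measured B 138.69x faster at the largest size both finished (A timed out beyond that, so that run could not confirm it as a label).
import Mathlib
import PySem

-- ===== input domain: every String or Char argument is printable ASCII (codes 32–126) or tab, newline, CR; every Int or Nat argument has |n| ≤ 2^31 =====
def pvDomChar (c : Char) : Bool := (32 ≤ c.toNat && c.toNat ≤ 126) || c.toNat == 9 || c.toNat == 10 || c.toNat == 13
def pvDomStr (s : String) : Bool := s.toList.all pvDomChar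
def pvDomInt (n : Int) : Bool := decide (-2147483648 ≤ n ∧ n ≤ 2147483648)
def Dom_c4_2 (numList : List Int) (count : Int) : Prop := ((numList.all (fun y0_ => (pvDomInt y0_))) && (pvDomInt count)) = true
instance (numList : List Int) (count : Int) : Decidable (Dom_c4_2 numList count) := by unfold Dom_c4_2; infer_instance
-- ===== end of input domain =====

-- B replaces A's double recursion (exponentially many calls) by one iterative loop over the
-- stepped indices tracking the running maximum; intended as faster (measured 138.69x at the
-- largest size both versions finished; A timed out on larger inputs).

-- ===== PORT A =====
-- Literal port of A's recursion; list indexing via PySem.List.pyGet? (the .getD 0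
-- default is only reached outside Pre_c4_2, where Python raises IndexError).
def c4_2 (numList : List Int) (count : Int) : Int :=
  if count ≤ 1 then (PySem.List.pyGet? numList 0).getD 0
  else
    let r := c4_2 numList (count - 2)
    let v := (PySem.List.pyGet? numList (count - 1)).getD 0
    if v > r then v else r
termination_by count.toNat
decreasing_by omega

-- ===== PORT B =====
-- the while loop of Source B: state (i, best)
def c4_2_loop (numList : List Int) (i : Int) (best : Int) : Int :=
  if i ≥ 1 then
    let v := (PySem.List.pyGet? numList i).getD 0
    c4_2_loop numList (i - 2) (if v > best then v else best)
  else best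
termination_by i.toNat
decreasing_by omega

def c4_2_alt (numList : List Int) (count : Int) : Int :=
  c4_2_loop numList (count - 1) ((PySem.List.pyGet? numList 0).getD 0)

-- ===== PRECONDITION & SPEC =====
-- Python A raises IndexError on an empty list, and (for count > 1) when count exceeds
-- the list length; exactly those inputs are excluded.
def Pre_c4_2 (numList : List Int) (count : Int) : Prop :=
  numList ≠ [] ∧ count ≤ (numList.length : Int)
instance (numList : List Int) (count : Int) : Decidable (Pre_c4_2 numList count) := by
  unfold Pre_c4_2; infer_instance
def pvWitness_c4_2 : List Int × Int := ([3, 1, 4, 1, 5], 5)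
def Spec_c4_2 (numList : List Int) (count : Int) (out : Int) : Prop := out = c4_2_alt numList count
instance (numList : List Int) (count : Int) (out : Int) : Decidable (Spec_c4_2 numList count out) := by unfold Spec_c4_2; infer_instance

-- ===== CLAIM (what is proved, stated in full; the proofs are below) =====
def Claim_equal_c4_2 : Prop := ∀ (numList : List Int) (count : Int), Dom_c4_2 numList count → Pre_c4_2 numList count → Spec_c4_2 numList count (c4_2 numList count)

-- ===== LEMMAS AND PROOFS =====

theorem if_gt_eq_max (v b : Int) : (if v > b then v else b) = max b v := by
  rw [max_def]; split_ifs <;> omega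

theorem c4_2_loop_pos (numList : List Int) (i b : Int) (h : i ≥ 1) :
    c4_2_loop numList i b =
      c4_2_loop numList (i - 2) (max b ((PySem.List.pyGet? numList i).getD 0)) := by
  rw [c4_2_loop]; simp [h, if_gt_eq_max]

theorem c4_2_loop_neg (numList : List Int) (i b : Int) (h : ¬ i ≥ 1) :
    c4_2_loop numList i b = b := by
  rw [c4_2_loop]; simp [h]

theorem c4_2_pos (numList : List Int) (count : Int) (h : ¬ count ≤ 1) :
    c4_2 numList count =
      max (c4_2 numList (count - 2)) ((PySem.List.pyGet? numList (count - 1)).getD 0) := by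
  rw [c4_2]; simp [h, if_gt_eq_max]

theorem c4_2_neg (numList : List Int) (count : Int) (h : count ≤ 1) :
    c4_2 numList count = (PySem.List.pyGet? numList 0).getD 0 := by
  rw [c4_2]; simp [h]

-- the loop accumulates a maximum: a max in the accumulator can be pulled out
theorem c4_2_loop_max (numList : List Int) (i b c : Int) :
    c4_2_loop numList i (max b c) = max b (c4_2_loop numList i c) := by
  by_cases h : i ≥ 1
  · rw [c4_2_loop_pos numList i _ h, c4_2_loop_pos numList i c h, max_assoc,
      c4_2_loop_max numList (i - 2) b]
  · rw [c4_2_loop_neg numList i _ h, c4_2_loop_neg numList i c h]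
termination_by i.toNat
decreasing_by omega

theorem c4_2_eq_loop (numList : List Int) (count : Int) :
    c4_2 numList count =
      c4_2_loop numList (count - 1) ((PySem.List.pyGet? numList 0).getD 0) := by
  by_cases h : count ≤ 1
  · rw [c4_2_neg numList count h, c4_2_loop_neg numList (count - 1) _ (by omega)]
  · have h' : count - 1 ≥ 1 := by omega
    rw [c4_2_pos numList count h, c4_2_eq_loop numList (count - 2),
      c4_2_loop_pos numList (count - 1) _ h', max_comm]
    have e : count - 2 - 1 = count - 1 - 2 := by omega
    rw [e, ← c4_2_loop_max numList (count - 1 - 2),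
      max_comm ((PySem.List.pyGet? numList (count - 1)).getD 0)]
termination_by count.toNat
decreasing_by omega

-- ===== VERDICT (by name: the statement is the Claim_ definition above) =====
theorem c4_2_spec : Claim_equal_c4_2 := by
  intro numList count _ _
  unfold Spec_c4_2 c4_2_alt
  exact c4_2_eq_loop numList count
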